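-- pv_equiv track=rewrite | github.com/codl/problem-du-jour | main.py | maybe_separate_version
-- ===== SOURCE A (Python) =====
-- def maybe_separate_version(part):
--     """
--     >>> maybe_separate_version("abc123")
--     'abc 123'
--     >>> maybe_separate_version("abc")
--     'abc'
--     >>> maybe_separate_version("123")
--     '123'
--     """
--     version_chars = "0123456789."
--
--     trap = part[::-1]
--     # trap is part backwards lol
--     trap2 = ""
--     isversion = True;
--     for c in trap:
--         if isversion and c not in version_chars:
--             trap2 += " "
--             isversion = False
--         trap2 += c
--
--     part2 = trap2[::-1]
--
--     return part2.strip()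
-- ===== SOURCE B (Python) =====
-- def maybe_separate_version(part):
--     # Idiomatic: strip the trailing version-character run off with rstrip,
--     # insert a space at the split point if it is strictly inside the string.
--     head = part.rstrip("0123456789.")
--     if head and len(head) < len(part):
--         return (head + " " + part[len(head):]).strip()
--     return part.strip()
-- ===== Notes on version B (the rewrite author's own statement) =====
-- stated objective: idiomatic
-- what changed: B replaces A's reverse-the-string / boolean-flag per-character accumulation loop with a single rstrip of the version characters to find the split point, then one slice-and-concatenate with a strip in each branch.
import Mathlib
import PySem

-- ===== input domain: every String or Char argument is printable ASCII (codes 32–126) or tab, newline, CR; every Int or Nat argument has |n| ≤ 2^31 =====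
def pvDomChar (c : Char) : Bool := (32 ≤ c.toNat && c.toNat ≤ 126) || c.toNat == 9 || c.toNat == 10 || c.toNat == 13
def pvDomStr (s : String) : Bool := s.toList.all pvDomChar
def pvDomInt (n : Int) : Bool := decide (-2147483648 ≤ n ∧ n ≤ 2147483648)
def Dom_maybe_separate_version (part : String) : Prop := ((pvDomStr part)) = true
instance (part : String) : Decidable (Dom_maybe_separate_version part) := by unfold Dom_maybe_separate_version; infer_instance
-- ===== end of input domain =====

-- B replaces A's reverse-and-flag accumulation loop with an rstrip("0123456789.") split; idiomatic, same result.

-- ===== PORT A =====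
-- version_chars = "0123456789."
def pvVC : List Char := "0123456789.".toList

-- c in version_chars
def pvIsVC (c : Char) : Bool := pvVC.contains c

-- one iteration of A's for-loop body over the state (trap2, isversion)
def pvStepA (st : List Char × Bool) (c : Char) : List Char × Bool :=
  if st.2 && !(pvIsVC c) then ((st.1 ++ [' ']) ++ [c], false)
  else (st.1 ++ [c], st.2)

def maybe_separate_version (part : String) : String :=
  let trap := part.toList.reverse          -- trap = part[::-1]  (PySem.List.slice?_none_none_neg_one: reverse)
  let trap2 := (trap.foldl pvStepA ([], true)).1
  let part2 := trap2.reverse               -- part2 = trap2[::-1]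
  String.ofList (PySem.Chars.strip part2)  -- part2.strip()

-- ===== PORT B =====
def maybe_separate_version_alt (part : String) : String :=
  let l := part.toList
  -- head = part.rstrip("0123456789."): exact hand port (drop the given chars from the right)
  let head := (l.reverse.dropWhile (fun c => pvIsVC c)).reverse
  if !head.isEmpty && head.length < l.length then
    -- (head + " " + part[len(head):]).strip(); part[len(head):] = drop (PySem.List.slice_from_natCast)
    String.ofList (PySem.Chars.strip ((head ++ [' ']) ++ l.drop head.length))
  else
    String.ofList (PySem.Chars.strip l)    -- part.strip()

-- ===== PRECONDITION & SPEC =====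
def Spec_maybe_separate_version (part : String) (out : String) : Prop := out = maybe_separate_version_alt part
instance (part : String) (out : String) : Decidable (Spec_maybe_separate_version part out) := by unfold Spec_maybe_separate_version; infer_instance

-- ===== CLAIM (what is proved, stated in full; the proofs are below) =====
def Claim_equal_maybe_separate_version : Prop := ∀ (part : String), Dom_maybe_separate_version part → Spec_maybe_separate_version part (maybe_separate_version part)

-- ===== LEMMAS AND PROOFS =====

-- once the flag is false, A's loop just copies the remaining characters
theorem pv_foldA_false (cs : List Char) (t : List Char) :
    cs.foldl pvStepA (t, false) = (t ++ cs, false) := by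
  induction cs generalizing t with
  | nil => simp
  | cons c cs ih => simp [pvStepA, ih]

-- A's loop from flag = true: copy the maximal version-char prefix, insert ' ' at the first other char
theorem pv_foldA_true (cs : List Char) (t : List Char) :
    cs.foldl pvStepA (t, true) =
      if cs.dropWhile (fun c => pvIsVC c) = [] then (t ++ cs, true)
      else (t ++ cs.takeWhile (fun c => pvIsVC c)
              ++ ' ' :: cs.dropWhile (fun c => pvIsVC c), false) := by
  induction cs generalizing t with
  | nil => simp
  | cons c cs ih =>
    by_cases h : pvIsVC c = true
    · rw [List.foldl_cons,
        show pvStepA (t, true) c = (t ++ [c], true) from by simp [pvStepA, h],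
        ih, List.dropWhile_cons_of_pos h, List.takeWhile_cons_of_pos h]
      split <;> simp
    · rw [List.foldl_cons,
        show pvStepA (t, true) c = ((t ++ [' ']) ++ [c], false) from by simp [pvStepA, h],
        pv_foldA_false,
        List.dropWhile_cons_of_neg (by simpa using h),
        List.takeWhile_cons_of_neg (by simpa using h),
        if_neg (by exact List.cons_ne_nil c cs)]
      simp

theorem pv_rstrip_space (x : List Char) :
    PySem.Chars.rstrip (x ++ [' ']) = PySem.Chars.rstrip x := by
  simp [PySem.Chars.rstrip, show PySem.Chars.isspace ' ' = true by decide]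

theorem pv_strip_space (x : List Char) :
    PySem.Chars.strip (x ++ [' ']) = PySem.Chars.strip x := by
  unfold PySem.Chars.strip PySem.Chars.lstrip
  rw [List.dropWhile_append]
  by_cases h : List.dropWhile PySem.Chars.isspace x = []
  · simp [h, show PySem.Chars.isspace ' ' = true by decide, PySem.Chars.rstrip]
  · simp [h, pv_rstrip_space]

-- ===== VERDICT (by name: the statement is the Claim_ definition above) =====
theorem maybe_separate_version_spec : Claim_equal_maybe_separate_version := by
  intro part _
  unfold Spec_maybe_separate_version
  simp only [maybe_separate_version, maybe_separate_version_alt]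
  generalize part.toList = l
  rw [pv_foldA_true]
  set tw := l.reverse.takeWhile (fun c => pvIsVC c) with htw_def
  set dw := l.reverse.dropWhile (fun c => pvIsVC c) with hdw_def
  have hsplit : tw ++ dw = l.reverse := List.takeWhile_append_dropWhile
  by_cases hdw : dw = []
  · -- whole string is version chars: head = [], both sides strip l
    rw [if_pos hdw, hdw]
    simp
  · by_cases htw : tw = []
    · -- no trailing version run: A appends a stripped-away space, B takes the else branch
      have hdw' : dw = l.reverse := by
        conv_rhs => rw [← hsplit]
        rw [htw, List.nil_append]
      rw [if_neg hdw, htw, if_neg (by rw [hdw']; simp)]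
      show String.ofList (PySem.Chars.strip (([] ++ ' ' :: dw).reverse)) = _
      rw [List.nil_append,
        show (' ' :: dw).reverse = l ++ [' '] from by rw [hdw']; simp,
        pv_strip_space]
    · -- proper split: both sides build head ++ ' ' ++ trailing version run
      have hl2 : dw.reverse ++ tw.reverse = l := by
        have h := congrArg List.reverse hsplit
        rw [List.reverse_append, List.reverse_reverse] at h
        exact h
      have hlen : dw.reverse.length < l.length := by
        have h1 := congrArg List.length hl2
        have h2 : 0 < tw.length := List.length_pos_iff.mpr htw
        simp only [List.length_append, List.length_reverse] at h1 ⊢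
        omega
      have hdrop : l.drop dw.reverse.length = tw.reverse := by
        have h : List.drop dw.reverse.length (dw.reverse ++ tw.reverse) = tw.reverse :=
          List.drop_left
        rw [hl2] at h
        exact h
      rw [if_neg hdw,
        if_pos (by
          simp only [Bool.and_eq_true, Bool.not_eq_true', List.isEmpty_eq_false_iff,
            decide_eq_true_eq]
          exact ⟨by simpa using hdw, hlen⟩),
        hdrop]
      show String.ofList (PySem.Chars.strip ((tw ++ ' ' :: dw).reverse)) = _
      congr 2
      simp
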